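-- pv_equiv track=rewrite | github.com/DemalexS/regexp | regular.py | delete_duplicates_contact
-- ===== SOURCE A (Python) =====
-- def delete_duplicates_contact(format_contact_list):
--   phone_book = dict()
--   for contact in format_contact_list:
--     if contact[0] in phone_book:
--       contact_value = phone_book[contact[0]]
--       for i in range(len(contact_value)):
--         if contact[i]:
--           contact_value[i] = contact[i]
--     else:
--       phone_book[contact[0]] = contact
--   return list(phone_book.values())
-- ===== SOURCE B (Python) =====
-- def delete_duplicates_contact(format_contact_list):
--   # Group contacts by their first field (first-occurrence order), then collapse
--   # each group by mutating the group's first contact in place (same side effect as A).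
--   groups = {}
--   for contact in format_contact_list:
--     key = contact[0]
--     if key in groups:
--       groups[key].append(contact)
--     else:
--       groups[key] = [contact]
--   result = []
--   for group in groups.values():
--     base = group[0]
--     for c in group[1:]:
--       base[:] = [c[i] if c[i] else base[i] for i in range(len(base))]
--     result.append(base)
--   return result
-- ===== Notes on version B (the rewrite author's own statement) =====
-- stated objective: alternative
-- what changed: Replaces A's single pass that merges each duplicate into the dict entry as it is seen by a two-phase design: one pass groups contacts into lists keyed by first field (setdefault/append), then a second pass collapses each group into its first contact via a list comprehension over the base's indices.
import Mathlib
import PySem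

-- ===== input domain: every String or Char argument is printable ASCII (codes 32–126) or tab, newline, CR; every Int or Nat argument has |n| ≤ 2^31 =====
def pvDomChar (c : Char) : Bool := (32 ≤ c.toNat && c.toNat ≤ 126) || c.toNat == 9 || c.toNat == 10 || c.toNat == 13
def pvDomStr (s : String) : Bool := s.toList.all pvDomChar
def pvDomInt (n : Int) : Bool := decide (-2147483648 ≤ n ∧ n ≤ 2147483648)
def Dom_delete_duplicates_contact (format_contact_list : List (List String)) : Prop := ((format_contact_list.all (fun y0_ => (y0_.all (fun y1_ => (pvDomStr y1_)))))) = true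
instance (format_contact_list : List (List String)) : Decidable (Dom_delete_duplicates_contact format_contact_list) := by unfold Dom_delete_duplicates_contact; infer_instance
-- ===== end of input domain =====

-- B replaces A's merge-as-you-go dict pass by a two-phase group-then-collapse design.
-- In Python both A and B mutate the first contact of each duplicate group in place;
-- the equivalence proved here is about the return value. Objective: alternative
-- decomposition, no speed claim.

-- ===== PORT A =====
-- A's inner loop: for i in range(len(contact_value)): if contact[i]: contact_value[i] = contact[i]
def pvMergeA (value contact : List String) : List String :=
  (PySem.List.pyRange 0 (value.length : Int) 1).foldl
    (fun v i =>
      match PySem.List.pyGet? contact i with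
      | some s => if s ≠ "" then PySem.List.pySetD v i s else v
      | none => v)   -- IndexError in Python: such inputs are excluded by Pre_
    value

-- A's loop body: merge into phone_book if contact[0] is present, else store contact
def pvStepA (phone_book : PySem.Dict String (List String)) (contact : List String) :
    PySem.Dict String (List String) :=
  match contact with
  | [] => phone_book   -- contact[0] raises IndexError in Python: excluded by Pre_
  | k :: _ =>
    match phone_book.get? k with
    | some contact_value => phone_book.insert k (pvMergeA contact_value contact)
    | none => phone_book.insert k contact

def delete_duplicates_contact (format_contact_list : List (List String)) : List (List String) :=
  (format_contact_list.foldl pvStepA PySem.Dict.empty).values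

-- ===== PORT B =====
-- B's comprehension: base[:] = [c[i] if c[i] else base[i] for i in range(len(base))]
def pvMergeB (base c : List String) : List String :=
  (PySem.List.pyRange 0 (base.length : Int) 1).map
    (fun i =>
      if PySem.List.pyGetD c i "" ≠ "" then PySem.List.pyGetD c i ""
      else PySem.List.pyGetD base i "")

-- B's first loop body: append contact to its group (new groups at the end)
def pvStepB (groups : PySem.Dict String (List (List String))) (contact : List String) :
    PySem.Dict String (List (List String)) :=
  match contact with
  | [] => groups   -- contact[0] raises IndexError in Python: excluded by Pre_
  | key :: _ =>
    match groups.get? key with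
    | some g => groups.insert key (g ++ [contact])
    | none => groups.insert key [contact]

-- B's second loop body: collapse one group into its first contact and append it to result
def pvEmitB (result : List (List String)) (group : List (List String)) : List (List String) :=
  match group with
  | [] => result   -- unreachable: groups never hold an empty list
  | base :: rest => result ++ [rest.foldl pvMergeB base]

def delete_duplicates_contact_alt (format_contact_list : List (List String)) : List (List String) :=
  let groups := format_contact_list.foldl pvStepB PySem.Dict.empty
  groups.values.foldl pvEmitB []

-- ===== PRECONDITION & SPEC =====
-- Pre_ excludes exactly the inputs on which the Python A raises IndexError: an empty
-- contact (contact[0]), or a duplicate contact shorter than the first contact of its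
-- key (contact[i] inside the merge loop).
def Pre_delete_duplicates_contact (format_contact_list : List (List String)) : Prop :=
  (∀ c ∈ format_contact_list, c ≠ []) ∧
  ∀ j, j < format_contact_list.length → ∀ i, i < j →
    (format_contact_list[i]!).head? = (format_contact_list[j]!).head? →
    (∀ k, k < i → (format_contact_list[k]!).head? ≠ (format_contact_list[i]!).head?) →
    (format_contact_list[i]!).length ≤ (format_contact_list[j]!).length
instance (format_contact_list : List (List String)) : Decidable (Pre_delete_duplicates_contact format_contact_list) := by
  unfold Pre_delete_duplicates_contact
  exact @instDecidableAnd _ _ (by infer_instance) (Nat.decidableBallLT _ _)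

def pvWitness_delete_duplicates_contact : List (List String) :=
  [["alice", "111", ""], ["bob", "222"], ["alice", "", "a@x.y"]]

def Spec_delete_duplicates_contact (format_contact_list : List (List String)) (out : List (List String)) : Prop := out = delete_duplicates_contact_alt format_contact_list
instance (format_contact_list : List (List String)) (out : List (List String)) : Decidable (Spec_delete_duplicates_contact format_contact_list out) := by unfold Spec_delete_duplicates_contact; infer_instance

-- ===== CLAIM (what is proved, stated in full; the proofs are below) =====
def Claim_equal_delete_duplicates_contact : Prop := ∀ (format_contact_list : List (List String)), Dom_delete_duplicates_contact format_contact_list → Pre_delete_duplicates_contact format_contact_list → Spec_delete_duplicates_contact format_contact_list (delete_duplicates_contact format_contact_list)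

-- ===== LEMMAS AND PROOFS =====

-- the two merge rules compute the same list (A folds destructive sets, B maps a comprehension)
theorem merge_aux (c v : List String) (n : Nat) (h : n ≤ v.length) :
    (List.range n).foldl
      (fun v' (k : Nat) =>
        match PySem.List.pyGet? c (k : Int) with
        | some s => if s ≠ "" then PySem.List.pySetD v' (k : Int) s else v'
        | none => v') v
    = (List.range n).map
        (fun (k : Nat) => if PySem.List.pyGetD c (k : Int) "" ≠ "" then PySem.List.pyGetD c (k : Int) ""
                  else PySem.List.pyGetD v (k : Int) "") ++ v.drop n := by
  induction n with
  | zero => simp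
  | succ n ih =>
    have hn : n < v.length := by omega
    rw [List.range_succ, List.foldl_append, List.map_append, ih (by omega)]
    simp only [List.foldl_cons, List.foldl_nil, List.map_cons, List.map_nil]
    have hdrop : v.drop n = v[n] :: v.drop (n + 1) := List.drop_eq_getElem_cons hn
    have hlenmap : ((List.range n).map
        (fun (k : Nat) => if PySem.List.pyGetD c (k : Int) "" ≠ "" then PySem.List.pyGetD c (k : Int) ""
                  else PySem.List.pyGetD v (k : Int) "")).length = n := by simp
    have hvgetD : PySem.List.pyGetD v (n : Int) "" = v[n] := by
      rw [PySem.List.pyGetD_natCast, List.getD_eq_getElem?_getD]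
      simp [hn]
    cases hc : PySem.List.pyGet? c (n : Int) with
    | none =>
      have hc' := hc
      rw [PySem.List.pyGet?_natCast] at hc'
      have hcd : PySem.List.pyGetD c (n : Int) "" = "" := by
        rw [PySem.List.pyGetD_natCast, List.getD_eq_getElem?_getD, hc']; rfl
      simp only [hcd, hvgetD, ne_eq, not_true_eq_false, if_false]
      rw [hdrop]
      simp
    | some s =>
      have hc' := hc
      rw [PySem.List.pyGet?_natCast] at hc'
      have hcd : PySem.List.pyGetD c (n : Int) "" = s := by
        rw [PySem.List.pyGetD_natCast, List.getD_eq_getElem?_getD, hc']; rfl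
      by_cases hs : s = ""
      · simp only [hcd, hvgetD, hs, ne_eq, not_true_eq_false, if_false]
        rw [hdrop]; simp
      · simp only [hcd, hvgetD, ne_eq, hs, not_false_eq_true, if_true]
        rw [PySem.List.pySetD_natCast, hdrop, List.set_append, hlenmap]
        simp
        rw [hdrop]
        rfl

theorem merge_eq (v c : List String) : pvMergeA v c = pvMergeB v c := by
  unfold pvMergeA pvMergeB
  rw [PySem.List.pyRange_zero_natCast, List.foldl_map, List.map_map]
  rw [merge_aux c v v.length le_rfl]
  simp

-- collapse a duplicate group into its first contact (B's second pass, one group)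
def pvCollapse : List (List String) → List String
  | [] => []
  | b :: r => r.foldl pvMergeB b

theorem collapse_append (g : List (List String)) (c : List String) (hg : g ≠ []) :
    pvCollapse (g ++ [c]) = pvMergeB (pvCollapse g) c := by
  cases g with
  | nil => exact absurd rfl hg
  | cons b r => simp [pvCollapse, List.foldl_append]

-- lookup in a dict whose items are the pvCollapse-image of another dict's items
theorem get?_mk_map (l : List (String × List (List String))) (k : String) :
    (PySem.Dict.mk (l.map (fun p => (p.1, pvCollapse p.2)))).get? k
      = ((PySem.Dict.mk l).get? k).map pvCollapse := by
  induction l with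
  | nil => rfl
  | cons p rest ih =>
    obtain ⟨a, b⟩ := p
    simp only [List.map_cons, PySem.Dict.get?_mk_cons]
    by_cases h : a == k
    · simp [h]
    · simp [h, ih]

-- the fold of B's grouping loop keeps groups nonempty
theorem stepB_ne (l : List (List String)) (gd : PySem.Dict String (List (List String)))
    (h : ∀ p ∈ gd.items, p.2 ≠ ([] : List (List String))) :
    ∀ p ∈ (l.foldl pvStepB gd).items, p.2 ≠ ([] : List (List String)) := by
  induction l generalizing gd with
  | nil => exact h
  | cons c rest ih =>
    intro p hp
    refine ih _ ?_ p hp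
    intro q hq
    cases c with
    | nil => exact h q hq
    | cons k tl =>
      simp only [pvStepB] at hq
      cases hk : gd.get? k with
      | some g =>
        rw [hk] at hq
        rcases (PySem.Dict.mem_items_insert _ _ _ _).mp hq with he | ⟨hm, _⟩
        · subst he; simp
        · exact h q hm
      | none =>
        rw [hk] at hq
        rcases (PySem.Dict.mem_items_insert _ _ _ _).mp hq with he | ⟨hm, _⟩
        · subst he; simp
        · exact h q hm

-- main invariant: A's phone_book is the pvCollapse-image of B's groups, entry by entry
theorem loop_eq (l : List (List String)) (gd : PySem.Dict String (List (List String)))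
    (hnd : gd.keys.Nodup) (hne : ∀ p ∈ gd.items, p.2 ≠ ([] : List (List String))) :
    l.foldl pvStepA (PySem.Dict.mk (gd.items.map (fun p => (p.1, pvCollapse p.2))))
      = PySem.Dict.mk ((l.foldl pvStepB gd).items.map (fun p => (p.1, pvCollapse p.2))) := by
  induction l generalizing gd with
  | nil => rfl
  | cons c rest ih =>
    rw [List.foldl_cons, List.foldl_cons]
    cases c with
    | nil =>
      have hA : pvStepA (PySem.Dict.mk (gd.items.map (fun p => (p.1, pvCollapse p.2)))) [] =
          PySem.Dict.mk (gd.items.map (fun p => (p.1, pvCollapse p.2))) := rfl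
      have hB : pvStepB gd [] = gd := rfl
      rw [hA, hB]
      exact ih gd hnd hne
    | cons k tl =>
      have hget := get?_mk_map gd.items k
      have hgd : PySem.Dict.mk gd.items = gd := rfl
      rw [hgd] at hget
      cases hk : gd.get? k with
      | none =>
        have hcontains : gd.contains k = false := by
          rw [PySem.Dict.contains_eq_isSome_get?, hk]; rfl
        have hcontains' : (PySem.Dict.mk (gd.items.map (fun p => (p.1, pvCollapse p.2)))).contains k = false := by
          rw [PySem.Dict.contains_eq_isSome_get?, hget, hk]; rfl
        have hA : pvStepA (PySem.Dict.mk (gd.items.map (fun p => (p.1, pvCollapse p.2)))) (k :: tl) =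
            (PySem.Dict.mk (gd.items.map (fun p => (p.1, pvCollapse p.2)))).insert k (k :: tl) := by
          simp only [pvStepA, hget, hk, Option.map_none]
        have hB : pvStepB gd (k :: tl) = gd.insert k [k :: tl] := by
          simp only [pvStepB, hk]
        rw [hA, hB]
        have hins : (PySem.Dict.mk (gd.items.map (fun p => (p.1, pvCollapse p.2)))).insert k (k :: tl)
            = PySem.Dict.mk ((gd.insert k [k :: tl]).items.map (fun p => (p.1, pvCollapse p.2))) := by
          apply PySem.Dict.ext
          rw [PySem.Dict.items_insert_of_not_contains _ _ hcontains',
              PySem.Dict.items_insert_of_not_contains _ _ hcontains]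
          simp [pvCollapse]
        rw [hins]
        refine ih _ (PySem.Dict.nodup_keys_insert _ _ _ hnd) ?_
        intro q hq
        rcases (PySem.Dict.mem_items_insert _ _ _ _).mp hq with he | ⟨hm, _⟩
        · subst he; simp
        · exact hne q hm
      | some g =>
        have hgne : g ≠ [] := by
          have hmem : (k, g) ∈ gd.items := PySem.Dict.mem_items_of_get?_eq_some _ hk
          exact hne (k, g) hmem
        have hcontains : gd.contains k = true := by
          rw [PySem.Dict.contains_eq_isSome_get?, hk]; rfl
        have hcontains' : (PySem.Dict.mk (gd.items.map (fun p => (p.1, pvCollapse p.2)))).contains k = true := by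
          rw [PySem.Dict.contains_eq_isSome_get?, hget, hk]; rfl
        have hA : pvStepA (PySem.Dict.mk (gd.items.map (fun p => (p.1, pvCollapse p.2)))) (k :: tl) =
            (PySem.Dict.mk (gd.items.map (fun p => (p.1, pvCollapse p.2)))).insert k
              (pvMergeA (pvCollapse g) (k :: tl)) := by
          simp only [pvStepA, hget, hk, Option.map_some]
        have hB : pvStepB gd (k :: tl) = gd.insert k (g ++ [k :: tl]) := by
          simp only [pvStepB, hk]
        rw [hA, hB]
        have hins : (PySem.Dict.mk (gd.items.map (fun p => (p.1, pvCollapse p.2)))).insert k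
              (pvMergeA (pvCollapse g) (k :: tl))
            = PySem.Dict.mk ((gd.insert k (g ++ [k :: tl])).items.map (fun p => (p.1, pvCollapse p.2))) := by
          apply PySem.Dict.ext
          rw [PySem.Dict.items_insert_of_contains _ _ hcontains',
              PySem.Dict.items_insert_of_contains _ _ hcontains]
          rw [List.map_map, List.map_map]
          apply List.map_congr_left
          intro p _
          by_cases hpk : p.1 = k
          · simp [hpk, merge_eq, collapse_append g _ hgne]
          · simp [hpk]
        rw [hins]
        refine ih _ (PySem.Dict.nodup_keys_insert _ _ _ hnd) ?_
        intro q hq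
        rcases (PySem.Dict.mem_items_insert _ _ _ _).mp hq with he | ⟨hm, _⟩
        · subst he; simp
        · exact hne q hm

-- B's second pass over nonempty groups is a map of pvCollapse
theorem emit_eq (gs : List (List (List String))) (acc : List (List String))
    (h : ∀ g ∈ gs, g ≠ ([] : List (List String))) :
    gs.foldl pvEmitB acc = acc ++ gs.map pvCollapse := by
  induction gs generalizing acc with
  | nil => simp
  | cons g rest ih =>
    cases g with
    | nil => exact absurd rfl (h [] (by simp))
    | cons b r =>
      rw [List.foldl_cons]
      have : pvEmitB acc (b :: r) = acc ++ [pvCollapse (b :: r)] := rfl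
      rw [this, ih _ (fun g hg => h g (by simp [hg]))]
      simp

-- ===== VERDICT (by name: the statement is the Claim_ definition above) =====
theorem delete_duplicates_contact_spec : Claim_equal_delete_duplicates_contact := by
  intro l _ _
  unfold Spec_delete_duplicates_contact delete_duplicates_contact delete_duplicates_contact_alt
  have hempty : (PySem.Dict.empty : PySem.Dict String (List String))
      = PySem.Dict.mk (((PySem.Dict.empty : PySem.Dict String (List (List String))).items).map
          (fun p => (p.1, pvCollapse p.2))) := rfl
  rw [hempty, loop_eq l PySem.Dict.empty (by simp) (by intro p hp; simp [PySem.Dict.empty] at hp)]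
  rw [emit_eq _ [] (by
    intro g hg
    have : ∃ p ∈ (l.foldl pvStepB PySem.Dict.empty).items, p.2 = g := by
      simpa [PySem.Dict.values, List.mem_map] using hg
    rcases this with ⟨p, hp, he⟩
    have := stepB_ne l PySem.Dict.empty (by intro q hq; simp [PySem.Dict.empty] at hq) p hp
    rw [he] at this
    exact this)]
  simp [PySem.Dict.values, List.map_map]
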